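-- pv_equiv track=rewrite | github.com/alexbibov/lexgine | engine/preprocessing/util.py | is_subname
-- ===== SOURCE A (Python) =====
-- def is_subname(name_token1: str, name_token2: str) -> bool:
--     name_token1_parts = name_token1.split('::')
--     name_token2_parts = name_token2.split('::')
--
--     if len(name_token1_parts) > len(name_token2_parts):
--         return False
--
--     for idx, token in enumerate(reversed(name_token1_parts)):
--         if name_token2_parts[-1 - idx] != token:
--             return False
--
--     return True
-- ===== SOURCE B (Python) =====
-- def is_subname(name_token1: str, name_token2: str) -> bool:
--     # Peel the leading '<head>::' segment off name_token2 until the raw strings match;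
--     # no part lists are ever built.
--     while name_token1 != name_token2:
--         i = name_token2.find('::')
--         if i == -1:
--             return False
--         name_token2 = name_token2[i + 2:]
--     return True
-- ===== Notes on version B (the rewrite author's own statement) =====
-- stated objective: simpler
-- what changed: Instead of splitting both names into '::'-part lists and comparing them with a reversed indexed loop, B never builds a list: it repeatedly peels the leading '<head>::' segment off name_token2 with str.find and string slicing until the two raw strings are equal.
import Mathlib
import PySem

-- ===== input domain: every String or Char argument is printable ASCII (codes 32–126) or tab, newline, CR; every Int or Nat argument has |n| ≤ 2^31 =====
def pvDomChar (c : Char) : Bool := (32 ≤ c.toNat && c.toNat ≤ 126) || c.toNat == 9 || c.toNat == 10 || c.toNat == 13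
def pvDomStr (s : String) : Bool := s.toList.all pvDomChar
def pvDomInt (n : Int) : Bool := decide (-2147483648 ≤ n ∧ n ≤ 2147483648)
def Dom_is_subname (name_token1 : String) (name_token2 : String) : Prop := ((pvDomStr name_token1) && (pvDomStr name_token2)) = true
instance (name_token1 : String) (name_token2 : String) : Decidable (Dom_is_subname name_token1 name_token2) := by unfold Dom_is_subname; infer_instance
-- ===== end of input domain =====

-- B reproduces A by a different algorithm: instead of splitting both names into
-- '::'-part lists and running a reversed indexed comparison loop, B peels the
-- leading '<head>::' segment off name_token2 (str.find + slicing) until the raw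
-- strings are equal; objective: simpler.


-- ===== PORT A =====
-- the 'for idx, token in enumerate(reversed(name_token1_parts))' loop with its two early returns;
-- the 'none' branch is a totalization guard for the IndexError case (unreachable under the length guard)
def isSubnameLoopA (p2 : List String) : List (Int × String) → Bool
  | [] => true
  | (idx, token) :: rest =>
      match PySem.List.pyGet? p2 (-1 - idx) with
      | none => false
      | some v => if v ≠ token then false else isSubnameLoopA p2 rest

def is_subname (name_token1 : String) (name_token2 : String) : Bool :=
  let name_token1_parts := (PySem.Str.split? name_token1 "::").getD []
  let name_token2_parts := (PySem.Str.split? name_token2 "::").getD []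
  if name_token1_parts.length > name_token2_parts.length then false
  else isSubnameLoopA name_token2_parts (PySem.List.enumerate name_token1_parts.reverse)

-- ===== PORT B =====
-- the 'while name_token1 != name_token2' loop of Source B as tail recursion over the
-- code points of name_token2 (str.find / slicing via PySem.Chars primitives)
def isSubnameAltGo (c1 : List Char) (c2 : List Char) : Bool :=
  if c1 = c2 then true
  else
    let i := PySem.Chars.find c2 [':', ':']
    if h : i = -1 then false
    else isSubnameAltGo c1 (PySem.List.slice c2 (some (i + 2)) none)
termination_by c2.length
decreasing_by
  have h0 : (0 : Int) ≤ i := by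
    have := PySem.Chars.neg_one_le_find c2 [':', ':']
    simp only [i] at h ⊢
    omega
  have hinf : [':', ':'] <:+: c2 := by
    by_contra hc
    exact h ((PySem.Chars.find_eq_neg_one_iff c2 [':', ':']).mpr hc)
  have hlen : 2 ≤ c2.length := by
    have := hinf.length_le
    simpa using this
  rw [PySem.List.slice_from c2 (by omega : (0:Int) ≤ i + 2)]
  have : 2 ≤ (i + 2).toNat := by omega
  simp only [List.length_drop]
  omega

def is_subname_alt (name_token1 : String) (name_token2 : String) : Bool :=
  isSubnameAltGo name_token1.toList name_token2.toList

-- ===== PRECONDITION & SPEC =====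
def Spec_is_subname (name_token1 : String) (name_token2 : String) (out : Bool) : Prop := out = is_subname_alt name_token1 name_token2
instance (name_token1 : String) (name_token2 : String) (out : Bool) : Decidable (Spec_is_subname name_token1 name_token2 out) := by unfold Spec_is_subname; infer_instance

-- ===== CLAIM (what is proved, stated in full; the proofs are below) =====
def Claim_equal_is_subname : Prop := ∀ (name_token1 : String) (name_token2 : String), Dom_is_subname name_token1 name_token2 → Spec_is_subname name_token1 name_token2 (is_subname name_token1 name_token2)

-- ===== LEMMAS AND PROOFS =====

-- clean structural model of s.split('::') on code points
def pvS : List Char → List (List Char)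
  | [] => [[]]
  | [c] => [[c]]
  | c :: d :: rest =>
    if c = ':' ∧ d = ':' then [] :: pvS rest
    else
      match pvS (d :: rest) with
      | p :: ps => (c :: p) :: ps
      | [] => []

def pvConsHead (pre : List Char) : List (List Char) → List (List Char)
  | [] => [pre]
  | p :: ps => (pre ++ p) :: ps

theorem pvS_ne_nil (l : List Char) : pvS l ≠ [] := by
  match l with
  | [] => simp [pvS]
  | [c] => simp [pvS]
  | c :: d :: rest =>
      rw [pvS]
      split_ifs
      · simp
      · cases h : pvS (d :: rest) with
        | nil => exact absurd h (pvS_ne_nil (d :: rest))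
        | cons p ps => simp

theorem pvConsHead_nil_eq (xs : List (List Char)) (h : xs ≠ []) : pvConsHead [] xs = xs := by
  cases xs with
  | nil => exact absurd rfl h
  | cons p ps => simp [pvConsHead]

-- the fuel-driven splitOn.go computes pvS
theorem go_eq_pvS (fuel : Nat) (l cur : List Char) (acc : List (List Char))
    (hf : l.length < fuel) :
    PySem.Chars.splitOn.go [':', ':'] fuel l cur acc
      = acc.reverse ++ pvConsHead cur.reverse (pvS l) := by
  induction fuel generalizing l cur acc with
  | zero => omega
  | succ f ih =>
    match l, hf with
    | [], hf =>
        simp [PySem.Chars.splitOn.go, pvS, pvConsHead]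
    | [c], hf =>
        rw [PySem.Chars.splitOn.go]
        have hpre : List.isPrefixOf [':', ':'] [c] = false := by
          simp [List.isPrefixOf]
        rw [hpre]
        simp only [Bool.false_eq_true, if_false]
        rw [ih [] (c :: cur) acc (by simp at hf ⊢; omega)]
        simp [pvS, pvConsHead]
    | c :: d :: rest, hf =>
        rw [PySem.Chars.splitOn.go]
        by_cases hp : c = ':' ∧ d = ':'
        · obtain ⟨rfl, rfl⟩ := hp
          have hpre : List.isPrefixOf [':', ':'] (':' :: ':' :: rest) = true := by
            simp [List.isPrefixOf]
          rw [hpre]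
          simp only [if_true]
          rw [show List.drop [':',':'].length (':' :: ':' :: rest) = rest from rfl]
          rw [ih rest [] (cur.reverse :: acc) (by simp at hf ⊢; omega)]
          simp only [List.reverse_nil, pvConsHead_nil_eq _ (pvS_ne_nil rest)]
          simp [pvS, pvConsHead]
        · have hpre : List.isPrefixOf [':', ':'] (c :: d :: rest) = false := by
            rcases not_and_or.mp hp with h1 | h1 <;> simp [List.isPrefixOf] <;> tauto
          rw [hpre]
          simp only [Bool.false_eq_true, if_false]
          rw [ih (d :: rest) (c :: cur) acc (by simp at hf ⊢; omega)]
          rw [pvS, if_neg hp]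
          cases hS : pvS (d :: rest) with
          | nil => exact absurd hS (pvS_ne_nil _)
          | cons p ps => simp [pvConsHead]

theorem splitOn_eq_pvS (l : List Char) : PySem.Chars.splitOn l [':', ':'] = pvS l := by
  unfold PySem.Chars.splitOn
  rw [go_eq_pvS (l.length + 1) l [] [] (by omega)]
  simp [pvConsHead_nil_eq _ (pvS_ne_nil l)]

-- glue inverse of pvS: pvS is injective
def pvGlue : List (List Char) → List Char
  | [] => []
  | [p] => p
  | p :: q :: ps => p ++ ':' :: ':' :: pvGlue (q :: ps)

theorem pvGlue_pvS (l : List Char) : pvGlue (pvS l) = l := by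
  match l with
  | [] => simp [pvS, pvGlue]
  | [c] => simp [pvS, pvGlue]
  | c :: d :: rest =>
      rw [pvS]
      split_ifs with hp
      · obtain ⟨rfl, rfl⟩ := hp
        have ihr := pvGlue_pvS rest
        cases hS : pvS rest with
        | nil => exact absurd hS (pvS_ne_nil _)
        | cons p ps =>
            rw [hS] at ihr
            simp [pvGlue, ihr]
      · have ihr := pvGlue_pvS (d :: rest)
        cases hS : pvS (d :: rest) with
        | nil => exact absurd hS (pvS_ne_nil _)
        | cons p ps =>
            rw [hS] at ihr
            cases ps with
            | nil => simp_all [pvGlue]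
            | cons q ps' => simp_all [pvGlue]

theorem pvS_inj {l1 l2 : List Char} (h : pvS l1 = pvS l2) : l1 = l2 := by
  have := pvGlue_pvS l1
  rw [h, pvGlue_pvS] at this
  exact this.symm

-- no separator: a single part
theorem pvS_of_not_infix (l : List Char) (h : ¬ [':', ':'] <:+: l) : pvS l = [l] := by
  match l with
  | [] => simp [pvS]
  | [c] => simp [pvS]
  | c :: d :: rest =>
      have hp : ¬ (c = ':' ∧ d = ':') := by
        rintro ⟨rfl, rfl⟩
        exact h ⟨[], rest, rfl⟩
      have htail : ¬ [':', ':'] <:+: (d :: rest) := by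
        intro hc
        obtain ⟨s, t, hst⟩ := hc
        exact h ⟨c :: s, t, by rw [← hst]; rfl⟩
      rw [pvS, if_neg hp, pvS_of_not_infix (d :: rest) htail]

-- first occurrence at j: split off the head part
theorem pvS_split_first (j : Nat) (l : List Char)
    (hj : [':', ':'] <+: l.drop j) (hmin : ∀ i < j, ¬ [':', ':'] <+: l.drop i) :
    pvS l = l.take j :: pvS (l.drop (j + 2)) := by
  induction j generalizing l with
  | zero =>
      simp only [List.drop_zero] at hj
      obtain ⟨t, ht⟩ := hj
      have hl : l = ':' :: ':' :: t := by rw [← ht]; rfl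
      subst hl
      rw [pvS, if_pos ⟨rfl, rfl⟩]
      rfl
  | succ j ihj =>
      match l with
      | [] => simp at hj
      | [c] =>
          exfalso
          have : List.drop (j + 1) [c] = [] := by
            apply List.drop_eq_nil_of_le; simp
          rw [this] at hj
          obtain ⟨t, ht⟩ := hj
          simp at ht
      | c :: d :: rest =>
          have hp0 := hmin 0 (by omega)
          simp only [List.drop_zero] at hp0
          have hp : ¬ (c = ':' ∧ d = ':') := by
            rintro ⟨rfl, rfl⟩
            exact hp0 ⟨rest, rfl⟩
          rw [pvS, if_neg hp]
          have ih := ihj (d :: rest) (by simpa using hj)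
            (fun i hi => by simpa using hmin (i + 1) (by omega))
          rw [ih]
          rfl

-- B computes the suffix test on pvS
theorem altGo_eq_suffix (c1 c2 : List Char) :
    isSubnameAltGo c1 c2 = decide (pvS c1 <:+ pvS c2) := by
  fun_induction isSubnameAltGo c1 c2 with
  | case1 =>
      simp
  | case2 c2 hne i hneg =>
      simp only [i] at hneg
      have hinf : ¬ [':', ':'] <:+: c2 :=
        (PySem.Chars.find_eq_neg_one_iff c2 [':', ':']).mp hneg
      rw [pvS_of_not_infix c2 hinf]
      have : ¬ (pvS c1 <:+ [c2]) := by
        rw [List.suffix_cons_iff]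
        rintro (h1 | h1)
        · exact hne (pvS_inj (h1.trans (pvS_of_not_infix c2 hinf).symm))
        · exact pvS_ne_nil c1 (List.suffix_nil.mp h1)
      simp [this]
  | case3 c2 hne i hneg ih =>
      simp only [i] at hneg ih ⊢
      have h0 : (0 : Int) ≤ PySem.Chars.find c2 [':', ':'] := by
        have := PySem.Chars.neg_one_le_find c2 [':', ':']
        omega
      have hspec := PySem.Chars.find_spec (s := c2) (sub := [':', ':']) h0
      have hsplit := pvS_split_first (PySem.Chars.find c2 [':', ':']).toNat c2 hspec.1 hspec.2
      have hslice : PySem.List.slice c2 (some (PySem.Chars.find c2 [':', ':'] + 2)) none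
          = c2.drop ((PySem.Chars.find c2 [':', ':']).toNat + 2) := by
        rw [PySem.List.slice_from c2 (by omega : (0 : Int) ≤ PySem.Chars.find c2 [':', ':'] + 2)]
        congr 1
        omega
      rw [hslice] at ih
      rw [hslice, ih, decide_eq_decide, hsplit, List.suffix_cons_iff]
      constructor
      · exact Or.inr
      · rintro (h1 | h1)
        · exact absurd (pvS_inj (h1.trans hsplit.symm)) hne
        · exact h1

-- ==== A-side ====

-- negative index -1-k reads the k-th element of the reversed list
theorem pyGet_neg_reverse {α : Type} (l : List α) (k : Nat) (hk : k < l.length) :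
    PySem.List.pyGet? l (-1 - (k : Int)) = l.reverse[k]? := by
  have h1 : ¬((k : Int) ≤ -1) := by omega
  have h2 : (1 : Int) + k ≤ l.length := by omega
  have h3 : l.length - (k + 1) = l.length - 1 - k := by omega
  simp [PySem.List.pyGet?, PySem.List.pyIdx?, h1, h2, h3, List.getElem?_reverse hk]

-- the loop over enumerate(reversed parts) is an element-wise prefix test on the reversed lists
theorem loopA_eq_prefix (r1 : List String) (l2 : List String) (k : Nat)
    (h : r1.length + k ≤ l2.length) :
    isSubnameLoopA l2 (PySem.List.enumerate r1 (k : Int))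
      = ((l2.reverse.drop k).take r1.length == r1) := by
  induction r1 generalizing k with
  | nil => simp [PySem.List.enumerate_nil, isSubnameLoopA]
  | cons t rest ih =>
      have hk : k < l2.length := by simp at h; omega
      rw [PySem.List.enumerate_cons, isSubnameLoopA, pyGet_neg_reverse l2 k hk]
      have hk' : k < l2.reverse.length := by simpa using hk
      rw [List.getElem?_eq_getElem hk']
      have hdrop : l2.reverse.drop k = l2.reverse[k] :: l2.reverse.drop (k + 1) :=
        List.drop_eq_getElem_cons hk'
      rw [hdrop]
      have hrec := ih (k + 1) (by simp at h ⊢; omega)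
      have hcast : ((k : Int) + 1) = ((k + 1 : Nat) : Int) := by push_cast; ring
      rw [hcast, hrec]
      by_cases he : l2.reverse[k] = t
      · simp [he, List.take_succ_cons]
      · simp [List.take_succ_cons, beq_eq_decide]

-- A computes the suffix test on the part lists
theorem A_eq_suffix (t1 t2 : String) :
    is_subname t1 t2
      = decide ((pvS t1.toList).map String.ofList <:+ (pvS t2.toList).map String.ofList) := by
  have hsplit : ∀ t : String, (PySem.Str.split? t "::").getD []
      = (pvS t.toList).map String.ofList := by
    intro t
    rw [PySem.Str.split?]
    rw [show ("::" : String).toList = [':', ':'] from rfl]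
    rw [PySem.Chars.split?]
    simp [splitOn_eq_pvS]
  unfold is_subname
  rw [hsplit t1, hsplit t2]
  set a := (pvS t1.toList).map String.ofList with ha
  set b := (pvS t2.toList).map String.ofList with hb
  by_cases hlen : a.length > b.length
  · rw [if_pos hlen]
    have : ¬ (a <:+ b) := fun hs => by have := hs.length_le; omega
    simp [this]
  · rw [if_neg hlen]
    have h0 : a.reverse.length + 0 ≤ b.length := by simp; omega
    have := loopA_eq_prefix a.reverse b 0 h0
    simp only [Nat.cast_zero, List.drop_zero] at this
    rw [this]
    have hbeq : (b.reverse.take a.reverse.length == a.reverse)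
        = decide (a <:+ b) := by
      rw [beq_eq_decide, decide_eq_decide, ← List.reverse_prefix, List.prefix_iff_eq_take]
      exact eq_comm
    rw [hbeq]

-- mapped suffix reduces to pvS suffix (String.ofList is injective)
theorem map_ofList_suffix_iff (a b : List (List Char)) :
    (a.map String.ofList <:+ b.map String.ofList) ↔ a <:+ b := by
  have hinj : Function.Injective String.ofList := by
    intro x y h
    have := congrArg String.toList h
    simpa using this
  constructor
  · intro h
    rw [List.suffix_iff_eq_drop] at h ⊢
    rw [List.length_map, List.length_map, ← List.map_drop] at h
    exact List.map_injective_iff.mpr hinj h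
  · exact fun h => h.map _

-- ===== VERDICT (by name: the statement is the Claim_ definition above) =====
theorem is_subname_spec : Claim_equal_is_subname := by
  intro t1 t2 _
  unfold Spec_is_subname is_subname_alt
  rw [A_eq_suffix, altGo_eq_suffix]
  simp [map_ofList_suffix_iff]
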